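-- pv_equiv track=rewrite | github.com/Soumyadip54321/PythonProgramsAndProjects | Offplatform_projects/us_insurance/us_insurance.py | field_analysis
-- ===== SOURCE A (Python) =====
-- def field_analysis(title, category):        #function to analyse distribution in various categories of male & female
--     sexes_count = {}
--     for item in title:
--         if not(item in sexes_count.keys()):
--             sexes_count[item] = {}
--             (sexes_count[item])[category[1]] = 0
--         (sexes_count[item])[category[0]] = sexes_count[item].get(category[0], 0) + 1
--     return sexes_count
-- ===== SOURCE B (Python) =====
-- def field_analysis(title, category):
--     # Phase 1: count occurrences of each title item (insertion order = first appearance).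
--     counts = {}
--     for item in title:
--         counts[item] = counts.get(item, 0) + 1
--     # Phase 2: one comprehension turns each (item, cnt) pair into its inner dict.
--     return {item: {category[1]: 0, category[0]: cnt} for item, cnt in counts.items()}
-- ===== Notes on version B (the rewrite author's own statement) =====
-- stated objective: simpler
-- what changed: A incrementally builds and mutates a nested dict in one pass (membership test, initialise inner dict, then increment inside it per occurrence); B never mutates an inner dict: it counts occurrences of each title item in a flat dict, then builds the whole nested result in a single comprehension from those counts.
import Mathlib
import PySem

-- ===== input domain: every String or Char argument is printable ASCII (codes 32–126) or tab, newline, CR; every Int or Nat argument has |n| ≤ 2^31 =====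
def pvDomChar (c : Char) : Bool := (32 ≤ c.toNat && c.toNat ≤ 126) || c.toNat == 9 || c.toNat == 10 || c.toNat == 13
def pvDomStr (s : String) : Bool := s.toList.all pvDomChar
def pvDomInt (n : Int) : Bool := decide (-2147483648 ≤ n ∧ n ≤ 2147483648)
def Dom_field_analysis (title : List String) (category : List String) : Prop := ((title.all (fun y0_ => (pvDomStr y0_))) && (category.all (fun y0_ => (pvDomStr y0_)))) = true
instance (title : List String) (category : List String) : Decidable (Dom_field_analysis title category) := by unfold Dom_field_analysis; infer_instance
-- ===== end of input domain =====

-- B replaces A's single mutate-nested-dict-as-you-go pass by a flat count pass plus one comprehension building the nested result from the counts; objective: simpler, same result.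


-- ===== PORT A =====
-- category[1] / category[0] are ported with pyGetD: Python raises IndexError exactly when title ≠ []
-- and category has fewer than 2 elements, and Pre_field_analysis excludes exactly those inputs.
def field_analysis (title : List String) (category : List String) : List (String × List (String × Int)) :=
  (title.foldl (fun sexes item =>
      let sexes :=
        if sexes.contains item then sexes
        else sexes.insert item ((PySem.Dict.empty).insert (PySem.List.pyGetD category 1 "") (0 : Int))
      let inner := sexes.getD item PySem.Dict.empty
      sexes.insert item (inner.insert (PySem.List.pyGetD category 0 "")
        (inner.getD (PySem.List.pyGetD category 0 "") 0 + 1)))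
    (PySem.Dict.empty : PySem.Dict String (PySem.Dict String Int))).items.map (fun p => (p.1, p.2.items))

-- ===== PORT B =====
-- the comprehension iterates counts.items() whose keys are distinct, so its items are exactly this map.
def field_analysis_alt (title : List String) (category : List String) : List (String × List (String × Int)) :=
  let counts : PySem.Dict String Int :=
    title.foldl (fun c item => c.insert item (c.getD item 0 + 1)) PySem.Dict.empty
  counts.items.map (fun p =>
    (p.1, (((PySem.Dict.empty : PySem.Dict String Int).insert (PySem.List.pyGetD category 1 "") 0).insert
        (PySem.List.pyGetD category 0 "") p.2).items))

-- ===== PRECONDITION & SPEC =====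
-- Pre_ excludes exactly the inputs where Python A raises IndexError: a non-empty title with fewer than 2 categories.
def Pre_field_analysis (title : List String) (category : List String) : Prop :=
  title = [] ∨ 2 ≤ category.length
instance (title : List String) (category : List String) : Decidable (Pre_field_analysis title category) := by unfold Pre_field_analysis; infer_instance
def pvWitness_field_analysis : List String × List String := (["a", "b", "a"], ["male", "female"])

def Spec_field_analysis (title : List String) (category : List String) (out : List (String × List (String × Int))) : Prop := out = field_analysis_alt title category
instance (title : List String) (category : List String) (out : List (String × List (String × Int))) : Decidable (Spec_field_analysis title category out) := by unfold Spec_field_analysis; infer_instance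

-- ===== CLAIM (what is proved, stated in full; the proofs are below) =====
def Claim_equal_field_analysis : Prop := ∀ (title : List String) (category : List String), Dom_field_analysis title category → Pre_field_analysis title category → Spec_field_analysis title category (field_analysis title category)

-- ===== LEMMAS AND PROOFS =====

-- the inner dict A ends up holding for a title item that occurred n times
def pvInner (category : List String) (n : Int) : PySem.Dict String Int :=
  ((PySem.Dict.empty).insert (PySem.List.pyGetD category 1 "") (0 : Int)).insert
    (PySem.List.pyGetD category 0 "") n

-- A's nested dict as the image of a plain counter dict
def pvMapD (category : List String) (c : PySem.Dict String Int) : PySem.Dict String (PySem.Dict String Int) :=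
  PySem.Dict.mk (c.items.map (fun p => (p.1, pvInner category p.2)))

theorem pvMapD_get? (category : List String) (c : PySem.Dict String Int) (k : String) :
    (pvMapD category c).get? k = (c.get? k).map (pvInner category) := by
  obtain ⟨l⟩ := c
  induction l with
  | nil => rfl
  | cons p rest ih =>
      obtain ⟨a, b⟩ := p
      simp only [pvMapD, List.map_cons, PySem.Dict.get?_mk_cons] at *
      split_ifs <;> simp_all

theorem pvMapD_contains (category : List String) (c : PySem.Dict String Int) (k : String) :
    (pvMapD category c).contains k = c.contains k := by
  rw [PySem.Dict.contains_eq_isSome_get?, PySem.Dict.contains_eq_isSome_get?, pvMapD_get?]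
  simp

theorem pvMapD_insert (category : List String) (c : PySem.Dict String Int) (k : String) (v : Int) :
    pvMapD category (c.insert k v) = (pvMapD category c).insert k (pvInner category v) := by
  apply PySem.Dict.ext
  rw [show (pvMapD category (c.insert k v)).items = (c.insert k v).items.map (fun p => (p.1, pvInner category p.2)) from rfl,
      PySem.Dict.items_insert, PySem.Dict.items_insert, pvMapD_contains]
  by_cases h : c.contains k = true
  · simp only [h, if_true, List.map_map]
    rw [show (pvMapD category c).items = c.items.map (fun p => (p.1, pvInner category p.2)) from rfl, List.map_map]
    apply List.map_congr_left
    intro p _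
    by_cases hp : p.1 == k <;> simp [hp, Function.comp]
  · simp only [h]
    show _ = (pvMapD category c).items ++ _
    simp [pvMapD]

theorem pvInner_getD (category : List String) (n : Int) :
    (pvInner category n).getD (PySem.List.pyGetD category 0 "") 0 = n := by
  simp [pvInner, PySem.Dict.getD_insert_self]

theorem pvInner_insert (category : List String) (n m : Int) :
    (pvInner category n).insert (PySem.List.pyGetD category 0 "") m = pvInner category m := by
  simp [pvInner, PySem.Dict.insert_insert_self]

-- one step of A's loop tracks one step of the plain counter loop through pvMapD
theorem pv_stepA (category : List String) (c : PySem.Dict String Int) (item : String) :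
    (let sexes :=
       if (pvMapD category c).contains item then pvMapD category c
       else (pvMapD category c).insert item ((PySem.Dict.empty).insert (PySem.List.pyGetD category 1 "") (0 : Int))
     let inner := sexes.getD item PySem.Dict.empty
     sexes.insert item (inner.insert (PySem.List.pyGetD category 0 "")
       (inner.getD (PySem.List.pyGetD category 0 "") 0 + 1)))
    = pvMapD category (c.insert item (c.getD item 0 + 1)) := by
  rw [pvMapD_contains]
  by_cases hc : c.contains item = true
  · obtain ⟨v, hv⟩ : ∃ v, c.get? item = some v := by
      rw [PySem.Dict.contains_eq_isSome_get?] at hc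
      exact Option.isSome_iff_exists.mp hc
    have hgd : c.getD item 0 = v := PySem.Dict.getD_of_get?_eq_some c 0 hv
    have hmd : (pvMapD category c).getD item PySem.Dict.empty = pvInner category v := by
      rw [PySem.Dict.getD_eq_get?_getD, pvMapD_get?, hv]; rfl
    simp only [hc, if_true, hmd, pvInner_getD, pvInner_insert, hgd, pvMapD_insert]
  · have hc' : c.contains item = false := by simpa using hc
    simp only [hc', Bool.false_eq_true, if_false]
    have h1 : ((pvMapD category c).insert item ((PySem.Dict.empty).insert (PySem.List.pyGetD category 1 "") (0 : Int))).getD item PySem.Dict.empty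
        = (PySem.Dict.empty).insert (PySem.List.pyGetD category 1 "") (0 : Int) :=
      PySem.Dict.getD_insert_self _ _ _ _
    have h2 : ((PySem.Dict.empty : PySem.Dict String Int).insert (PySem.List.pyGetD category 1 "") (0 : Int)).getD (PySem.List.pyGetD category 0 "") 0 = 0 := by
      rw [PySem.Dict.getD_insert]
      split_ifs <;> rfl
    have h3 : c.getD item 0 = 0 := PySem.Dict.getD_of_not_contains c 0 hc'
    simp only [h1, h2, h3, PySem.Dict.insert_insert_self, pvMapD_insert]
    rfl

theorem pv_loopA (category : List String) (title : List String) (c : PySem.Dict String Int) :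
    title.foldl (fun sexes item =>
      let sexes :=
        if sexes.contains item then sexes
        else sexes.insert item ((PySem.Dict.empty).insert (PySem.List.pyGetD category 1 "") (0 : Int))
      let inner := sexes.getD item PySem.Dict.empty
      sexes.insert item (inner.insert (PySem.List.pyGetD category 0 "")
        (inner.getD (PySem.List.pyGetD category 0 "") 0 + 1)))
      (pvMapD category c)
    = pvMapD category (title.foldl (fun c item => c.insert item (c.getD item 0 + 1)) c) := by
  induction title generalizing c with
  | nil => rfl
  | cons x xs ih =>
      simp only [List.foldl_cons]
      rw [pv_stepA category c x]
      exact ih _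

-- ===== VERDICT (by name: the statement is the Claim_ definition above) =====
theorem field_analysis_spec : Claim_equal_field_analysis := by
  intro title category _ _
  unfold Spec_field_analysis field_analysis field_analysis_alt
  dsimp only
  conv_lhs => rw [show (PySem.Dict.empty : PySem.Dict String (PySem.Dict String Int)) = pvMapD category PySem.Dict.empty from rfl, pv_loopA]
  rw [show (pvMapD category (title.foldl (fun c item => c.insert item (c.getD item 0 + 1)) PySem.Dict.empty)).items
        = (title.foldl (fun c item => c.insert item (c.getD item 0 + 1)) PySem.Dict.empty).items.map
            (fun p => (p.1, pvInner category p.2)) from rfl]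
  simp [List.map_map, Function.comp, pvInner]
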